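-- pv_equiv track=rewrite | github.com/amanlai/stack-overflow-answers | python-problems/hashed-ports/solution.py | sentTimes
-- ===== SOURCE A (Python) =====
-- def sentTimes(numberOfPorts, transmissionTime, packetIds):
--     out = []
--     # port times left
--     dct = {}
--     # ultimate destinations
--     dests = (p % numberOfPorts for p in packetIds)
--     for count, d in enumerate(dests):
--         # if current port is busy
--         while dct.get(d, 0) > count:
--             # try next port
--             d = (d + 1) % numberOfPorts
--         out.append(d)
--         dct[d] = transmissionTime + count
--     return out
-- ===== SOURCE B (Python) =====
-- def _bisect_left(busy, x):
--     # first index whose element is >= x (busy is sorted); hand-written, no imports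
--     lo, hi = 0, len(busy)
--     while lo < hi:
--         mid = (lo + hi) // 2
--         if busy[mid] < x:
--             lo = mid + 1
--         else:
--             hi = mid
--     return lo
--
-- def _next_free(busy, start):
--     # smallest value >= start that is not in the sorted list busy
--     port = start
--     i = _bisect_left(busy, start)
--     while i < len(busy) and busy[i] == port:
--         port += 1
--         i += 1
--     return port
--
-- def sentTimes(numberOfPorts, transmissionTime, packetIds):
--     # Event-driven: keep only the sorted list of currently-busy ports; the port
--     # assigned at step c frees again exactly at step c + transmissionTime, read
--     # off the output history.  No dict of release times, no circular probing,
--     # and no O(numberOfPorts) table.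
--     out = []
--     busy = []
--     for count, p in enumerate(packetIds):
--         if transmissionTime >= 1 and count >= transmissionTime:
--             busy.remove(out[count - transmissionTime])
--         port = _next_free(busy, p % numberOfPorts)
--         if port >= numberOfPorts:
--             port = _next_free(busy, 0)
--         out.append(port)
--         if transmissionTime >= 1:
--             busy.insert(_bisect_left(busy, port), port)
--     return out
-- ===== Notes on version B (the rewrite author's own statement) =====
-- stated objective: alternative
-- what changed: A probes ports circularly against a dict of per-port release times; B keeps only a sorted list of currently-busy ports, releasing the port assigned at step c exactly at step c+transmissionTime (read off the output history) and picking the smallest non-busy port >= p%P (wrapping to the smallest non-busy port >= 0), so the dict, the per-probe release-time comparisons and any O(numberOfPorts) structure disappear.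
-- outside the precondition, e.g. on sentTimes(-2, 1, [3]): A returns [-1], B returns [0]
import Mathlib
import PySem

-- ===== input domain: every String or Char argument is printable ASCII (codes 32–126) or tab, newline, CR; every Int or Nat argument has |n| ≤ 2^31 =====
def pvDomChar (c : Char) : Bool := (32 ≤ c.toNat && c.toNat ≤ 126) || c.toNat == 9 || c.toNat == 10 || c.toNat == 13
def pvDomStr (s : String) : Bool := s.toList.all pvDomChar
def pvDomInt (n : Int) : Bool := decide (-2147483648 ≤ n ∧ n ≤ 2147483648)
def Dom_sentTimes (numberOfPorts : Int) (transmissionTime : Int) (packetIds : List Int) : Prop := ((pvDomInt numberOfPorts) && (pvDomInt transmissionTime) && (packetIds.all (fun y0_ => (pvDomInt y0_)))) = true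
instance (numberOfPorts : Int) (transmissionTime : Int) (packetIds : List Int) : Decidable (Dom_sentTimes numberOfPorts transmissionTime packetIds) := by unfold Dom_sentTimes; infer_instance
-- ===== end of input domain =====

-- B replaces A's per-packet circular probing of a release-time dict by an event-driven
-- sorted busy-port list (the port assigned at step c frees exactly at step c+transmissionTime,
-- read off the output history) queried by hand-written binary search;
-- objective: alternative algorithm, same outputs on Pre_.

-- ===== PORT A =====
-- fuel makes A's 'while' loop total; inside Pre_ the fuel numberOfPorts.natAbs is never exhausted
def probeA (P : Int) (dct : PySem.Dict Int Int) (count : Int) : Nat → Int → Int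
  | 0, d => d
  | (fuel+1), d => if dct.getD d 0 > count then probeA P dct count fuel (PySem.Int.mod (d + 1) P) else d

def stepA (P tt : Int) (s : List Int × PySem.Dict Int Int) (cp : Int × Int) : List Int × PySem.Dict Int Int :=
  let d := probeA P s.2 cp.1 P.natAbs (PySem.Int.mod cp.2 P)
  (s.1 ++ [d], s.2.insert d (tt + cp.1))

def sentTimes (numberOfPorts : Int) (transmissionTime : Int) (packetIds : List Int) : List Int :=
  ((PySem.List.enumerate packetIds).foldl (stepA numberOfPorts transmissionTime) ([], PySem.Dict.empty)).1

-- ===== PORT B =====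
-- _bisect_left of Source B: first index whose element is >= x (hand-written binary search)
def bisectL (l : List Int) (x : Int) (lo hi : Nat) : Nat :=
  if h : lo < hi then
    if l.getD ((lo + hi) / 2) 0 < x then bisectL l x ((lo + hi) / 2 + 1) hi
    else bisectL l x lo ((lo + hi) / 2)
  else lo
termination_by hi - lo
decreasing_by all_goals omega

-- the 'while i < len(busy) and busy[i] == port' walk of _next_free
def walkEq (l : List Int) (i : Nat) (port : Int) : Int :=
  if h : i < l.length ∧ l.getD i 0 = port then walkEq l (i + 1) (port + 1) else port
termination_by l.length - i
decreasing_by omega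

-- _next_free of Source B: smallest value >= start not in the sorted list busy
def nextFreeB (l : List Int) (start : Int) : Int :=
  walkEq l (bisectL l start 0 l.length) start

def stepB (P tt : Int) (s : List Int × List Int) (cp : Int × Int) : List Int × List Int :=
  -- busy.remove(out[count - tt]): total form; the port is present inside Pre_
  let busy0 := if tt ≥ 1 ∧ cp.1 ≥ tt then
      (PySem.List.remove? s.2 (PySem.List.pyGetD s.1 (cp.1 - tt) 0)).getD s.2
    else s.2
  let port0 := nextFreeB busy0 (PySem.Int.mod cp.2 P)
  let port := if port0 ≥ P then nextFreeB busy0 0 else port0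
  (s.1 ++ [port], if tt ≥ 1 then PySem.List.insert busy0 ((bisectL busy0 port 0 busy0.length : Nat) : Int) port else busy0)

def sentTimes_alt (numberOfPorts : Int) (transmissionTime : Int) (packetIds : List Int) : List Int :=
  ((PySem.List.enumerate packetIds).foldl (stepB numberOfPorts transmissionTime) ([], [])).1

-- ===== PRECONDITION & SPEC =====
-- Pre_ excludes (a) nonpositive numberOfPorts with a nonempty packet list — A's values there
-- rely on Python's negative modulo (or raise ZeroDivisionError for 0), while B naturally has
-- no free ports and raises — and (b) transmissionTime > numberOfPorts with more than
-- numberOfPorts packets, where A's probing 'while' loop never terminates.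
def Pre_sentTimes (numberOfPorts : Int) (transmissionTime : Int) (packetIds : List Int) : Prop :=
  packetIds = [] ∨ (1 ≤ numberOfPorts ∧ (transmissionTime ≤ numberOfPorts ∨ (packetIds.length : Int) ≤ numberOfPorts))

instance (numberOfPorts : Int) (transmissionTime : Int) (packetIds : List Int) : Decidable (Pre_sentTimes numberOfPorts transmissionTime packetIds) := by unfold Pre_sentTimes; infer_instance

def pvWitness_sentTimes : Int × Int × List Int := (3, 2, [5, 1, 7, 2])

def Spec_sentTimes (numberOfPorts : Int) (transmissionTime : Int) (packetIds : List Int) (out : List Int) : Prop := out = sentTimes_alt numberOfPorts transmissionTime packetIds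
instance (numberOfPorts : Int) (transmissionTime : Int) (packetIds : List Int) (out : List Int) : Decidable (Spec_sentTimes numberOfPorts transmissionTime packetIds out) := by unfold Spec_sentTimes; infer_instance

-- ===== CLAIM (what is proved, stated in full; the proofs are below) =====
def Claim_equal_sentTimes : Prop := ∀ (numberOfPorts : Int) (transmissionTime : Int) (packetIds : List Int), Dom_sentTimes numberOfPorts transmissionTime packetIds → Pre_sentTimes numberOfPorts transmissionTime packetIds → Spec_sentTimes numberOfPorts transmissionTime packetIds (sentTimes numberOfPorts transmissionTime packetIds)

-- ===== LEMMAS AND PROOFS =====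

-- The loop invariant relating A's state (out, dct) to B's state (out, free)
-- after out.length packets have been processed.
def PortInv (P tt : Int) (out : List Int) (dct : PySem.Dict Int Int) (busy : List Int) : Prop :=
  busy.Pairwise (· < ·) ∧
  (∀ q : Int, q ∈ busy ↔ ∃ v, dct.get? q = some v ∧ (out.length : Int) - 1 < v) ∧
  (∀ q v, dct.get? q = some v → ∃ c : Nat, c < out.length ∧ v = tt + (c : Int) ∧ out[c]? = some q) ∧
  (∀ c : Nat, c < out.length → ∃ q, out[c]? = some q ∧ 0 ≤ q ∧ q < P ∧ tt + (c : Int) ≤ dct.getD q 0) ∧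
  (tt ≥ 1 → ∀ c c' : Nat, c < c' → c' < out.length → out[c]? = out[c']? → (c : Int) + tt ≤ (c' : Int)) ∧
  (∀ q v, dct.get? q = some v → ∀ c : Nat, c < out.length → out[c]? = some q → tt + (c : Int) ≤ v) ∧
  (tt ≥ 1 → (busy.length : Int) = min (out.length : Int) tt)

theorem nodup_length_le (l1 l2 : List Int) (h : l1.Nodup) (hs : l1 ⊆ l2) : l1.length ≤ l2.length := by
  calc l1.length = l1.toFinset.card := (List.toFinset_card_of_nodup h).symm
    _ ≤ l2.toFinset.card := Finset.card_le_card (fun x hx => by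
        rw [List.mem_toFinset] at *; exact hs hx)
    _ ≤ l2.length := l2.toFinset_card_le

-- proof-only: the number of leading elements < x of a sorted list
def scanLT : List Int → Int → Nat
  | [], _ => 0
  | q :: qs, x => if q < x then scanLT qs x + 1 else 0

theorem scanLT_le (l : List Int) (x : Int) : scanLT l x ≤ l.length := by
  induction l with
  | nil => simp [scanLT]
  | cons q qs ih =>
    simp only [scanLT]
    split
    · simp only [List.length_cons]; omega
    · exact Nat.zero_le _

theorem scanLT_spec (l : List Int) (x : Int) (hs : l.Pairwise (· < ·)) :
    (∀ q ∈ l.take (scanLT l x), q < x) ∧ (∀ q ∈ l.drop (scanLT l x), x ≤ q) := by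
  induction l with
  | nil => simp [scanLT]
  | cons q qs ih =>
    rcases List.pairwise_cons.mp hs with ⟨hq, hqs⟩
    by_cases h : q < x
    · simp only [scanLT, if_pos h, List.take_succ_cons, List.drop_succ_cons]
      exact ⟨fun r hr => by
        rcases List.mem_cons.mp hr with rfl | hr
        · exact h
        · exact (ih hqs).1 r hr, (ih hqs).2⟩
    · simp only [scanLT, if_neg h, List.take_zero, List.drop_zero]
      refine ⟨by simp, fun r hr => ?_⟩
      rcases List.mem_cons.mp hr with rfl | hr
      · omega
      · have := hq r hr; omega

-- the sorted insert of Source B: insert at the scan position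
theorem insert_scan_spec (l : List Int) (x : Int) (hs : l.Pairwise (· < ·)) (hx : x ∉ l) :
    (PySem.List.insert l ((scanLT l x : Nat) : Int) x).Pairwise (· < ·) ∧
    (∀ q, q ∈ PySem.List.insert l ((scanLT l x : Nat) : Int) x ↔ q = x ∨ q ∈ l) ∧
    (PySem.List.insert l ((scanLT l x : Nat) : Int) x).length = l.length + 1 := by
  have hle := scanLT_le l x
  rw [PySem.List.insert_natCast l (scanLT l x) x hle]
  obtain ⟨h1, h2⟩ := scanLT_spec l x hs
  have hsplit : l.take (scanLT l x) ++ l.drop (scanLT l x) = l := List.take_append_drop _ l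
  refine ⟨?_, ?_, ?_⟩
  · rw [List.pairwise_append]
    refine ⟨hs.sublist (List.take_sublist _ _), ?_, ?_⟩
    · rw [List.pairwise_cons]
      refine ⟨fun b hb => ?_, hs.sublist (List.drop_sublist _ _)⟩
      have hxb := h2 b hb
      have : b ≠ x := fun h => hx (h ▸ List.mem_of_mem_drop hb)
      omega
    · intro a ha b hb
      have hax := h1 a ha
      rcases List.mem_cons.mp hb with rfl | hb
      · exact hax
      · have := h2 b hb; omega
  · intro r
    constructor
    · intro hr
      rcases List.mem_append.mp hr with hr | hr
      · exact Or.inr (List.mem_of_mem_take hr)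
      · rcases List.mem_cons.mp hr with rfl | hr
        · exact Or.inl rfl
        · exact Or.inr (List.mem_of_mem_drop hr)
    · intro hr
      rcases hr with rfl | hr
      · exact List.mem_append.mpr (Or.inr (List.mem_cons_self))
      · rw [← hsplit] at hr
        rcases List.mem_append.mp hr with hr | hr
        · exact List.mem_append.mpr (Or.inl hr)
        · exact List.mem_append.mpr (Or.inr (List.mem_cons_of_mem _ hr))
  · have : (l.take (scanLT l x)).length + (l.drop (scanLT l x)).length = l.length := by
      rw [← List.length_append, hsplit]
    simp only [List.length_append, List.length_cons]
    omega

theorem probe_seg (P : Int) (dct : PySem.Dict Int Int) (k t : Int)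
    (ht : ¬ dct.getD t 0 > k) (htP : t < P) :
    ∀ (fuel : Nat) (d : Int), 0 ≤ d → d ≤ t → (t - d).toNat < fuel →
    (∀ e, d ≤ e → e < t → dct.getD e 0 > k) →
    probeA P dct k fuel d = t := by
  intro fuel
  induction fuel with
  | zero => intro d _ _ hf _; omega
  | succ m ih =>
    intro d h0 hdt hf hbusy
    by_cases hdt' : d = t
    · subst hdt'; simp [probeA, ht]
    · have hdlt : d < t := lt_of_le_of_ne hdt hdt'
      have hb : dct.getD d 0 > k := hbusy d le_rfl hdlt
      simp only [probeA, if_pos hb]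
      have hmod : PySem.Int.mod (d + 1) P = d + 1 := by
        rw [PySem.Int.mod_eq_emod_of_pos (by omega)]
        exact Int.emod_eq_of_lt (by omega) (by omega)
      rw [hmod]
      exact ih (d + 1) (by omega) (by omega) (by omega)
        (fun e he1 he2 => hbusy e (by omega) he2)

theorem probe_wrap (P : Int) (dct : PySem.Dict Int Int) (k : Int) (hP : 1 ≤ P) :
    ∀ (fuel : Nat) (d : Int), 0 ≤ d → d < P →
    (∀ e, d ≤ e → e < P → dct.getD e 0 > k) → (P - d).toNat ≤ fuel →
    probeA P dct k fuel d = probeA P dct k (fuel - (P - d).toNat) 0 := by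
  intro fuel
  induction fuel with
  | zero => intro d _ hdP _ hf; omega
  | succ m ih =>
    intro d h0 hdP hbusy hf
    have hb := hbusy d le_rfl hdP
    simp only [probeA, if_pos hb]
    by_cases hP' : d + 1 = P
    · have hmod : PySem.Int.mod (d + 1) P = 0 := by
        rw [hP', PySem.Int.mod_eq_emod_of_pos (by omega)]
        exact Int.emod_self
      rw [hmod]
      have h1 : (P - d).toNat = 1 := by omega
      rw [h1]
      simp
    · have hmod : PySem.Int.mod (d + 1) P = d + 1 := by
        rw [PySem.Int.mod_eq_emod_of_pos (by omega)]
        exact Int.emod_eq_of_lt (by omega) (by omega)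
      rw [hmod]
      rw [ih (d + 1) (by omega) (by omega) (fun e he1 he2 => hbusy e (by omega) he2) (by omega)]
      congr 1
      omega

theorem scanLT_char : ∀ (l : List Int) (x : Int), l.Pairwise (· < ·) →
    (∀ j : Nat, j < scanLT l x → l.getD j 0 < x) ∧
    (∀ j : Nat, scanLT l x ≤ j → j < l.length → x ≤ l.getD j 0) := by
  intro l
  induction l with
  | nil => intro x _; exact ⟨fun j hj => by simp [scanLT] at hj, fun j _ hj => by simp at hj⟩
  | cons q qs ih =>
    intro x hs
    rcases List.pairwise_cons.mp hs with ⟨hq, hqs⟩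
    obtain ⟨ih1, ih2⟩ := ih x hqs
    by_cases h : q < x
    · simp only [scanLT, if_pos h]
      constructor
      · intro j hj
        cases j with
        | zero => simpa using h
        | succ j' => rw [List.getD_cons_succ]; exact ih1 j' (by omega)
      · intro j hj hjl
        cases j with
        | zero => omega
        | succ j' =>
          rw [List.getD_cons_succ]
          exact ih2 j' (by omega) (by simpa using hjl)
    · simp only [scanLT, if_neg h]
      refine ⟨fun j hj => by omega, ?_⟩
      intro j _ hjl
      cases j with
      | zero => simp only [List.getD_cons_zero]; omega
      | succ j' =>
        rw [List.getD_cons_succ]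
        have hj'l : j' < qs.length := by simpa using hjl
        have hmem : qs.getD j' 0 ∈ qs := by
          rw [List.getD_eq_getElem qs 0 hj'l]; exact List.getElem_mem hj'l
        have := hq _ hmem
        omega

theorem scanLT_unique (l : List Int) (x : Int) (hs : l.Pairwise (· < ·)) (n : Nat)
    (hlen : n ≤ l.length)
    (h1 : ∀ j : Nat, j < n → l.getD j 0 < x)
    (h2 : ∀ j : Nat, n ≤ j → j < l.length → ¬ l.getD j 0 < x) :
    n = scanLT l x := by
  obtain ⟨c1, c2⟩ := scanLT_char l x hs
  have hle := scanLT_le l x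
  rcases lt_trichotomy n (scanLT l x) with h | h | h
  · exact absurd (c1 n h) (h2 n le_rfl (by omega))
  · exact h
  · have ha := h1 (scanLT l x) h
    have hb := c2 (scanLT l x) le_rfl (by omega)
    omega

theorem sorted_getD_strict (l : List Int) (hs : l.Pairwise (· < ·)) (i j : Nat)
    (hij : i < j) (hj : j < l.length) : l.getD i 0 < l.getD j 0 := by
  rw [List.getD_eq_getElem l 0 (by omega), List.getD_eq_getElem l 0 hj]
  exact List.pairwise_iff_getElem.mp hs i j (by omega) hj hij

theorem bisectL_eq (l : List Int) (x : Int) (hs : l.Pairwise (· < ·)) :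
    ∀ (fuel lo hi : Nat), hi - lo ≤ fuel → lo ≤ hi → hi ≤ l.length →
    (∀ j : Nat, j < lo → l.getD j 0 < x) →
    (∀ j : Nat, hi ≤ j → j < l.length → ¬ l.getD j 0 < x) →
    bisectL l x lo hi = scanLT l x := by
  intro fuel
  induction fuel with
  | zero =>
    intro lo hi hf hlh hhl h1 h2
    rw [bisectL, dif_neg (by omega)]
    exact scanLT_unique l x hs lo (by omega) h1 (fun j hj hjl => h2 j (by omega) hjl)
  | succ m ih =>
    intro lo hi hf hlh hhl h1 h2
    by_cases hlt : lo < hi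
    · rw [bisectL, dif_pos hlt]
      by_cases hmid : l.getD ((lo + hi) / 2) 0 < x
      · rw [if_pos hmid]
        refine ih ((lo + hi) / 2 + 1) hi (by omega) (by omega) hhl ?_ h2
        intro j hj
        rcases eq_or_lt_of_le (by omega : j ≤ (lo + hi) / 2) with heq | hlt2
        · rw [heq]; exact hmid
        · have := sorted_getD_strict l hs j ((lo + hi) / 2) hlt2 (by omega)
          omega
      · rw [if_neg hmid]
        refine ih lo ((lo + hi) / 2) (by omega) (by omega) (by omega) h1 ?_
        intro j hj hjl
        rcases eq_or_lt_of_le hj with heq | hlt2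
        · rw [← heq]; exact hmid
        · have := sorted_getD_strict l hs ((lo + hi) / 2) j hlt2 hjl
          omega
    · rw [bisectL, dif_neg hlt]
      exact scanLT_unique l x hs lo (by omega) h1 (fun j hj hjl => h2 j (by omega) hjl)

theorem walk_spec (l : List Int) (hs : l.Pairwise (· < ·)) :
    ∀ (fuel i : Nat) (port : Int), l.length - i ≤ fuel →
    (∀ j : Nat, j < i → l.getD j 0 < port) →
    (∀ j : Nat, i ≤ j → j < l.length → port ≤ l.getD j 0) →
    port ≤ walkEq l i port ∧ walkEq l i port ∉ l ∧
      (∀ e, port ≤ e → e < walkEq l i port → e ∈ l) := by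
  intro fuel
  induction fuel with
  | zero =>
    intro i port hf h1 h2
    rw [walkEq, dif_neg (by omega)]
    refine ⟨le_refl port, ?_, fun e he1 he2 => absurd he2 (by omega)⟩
    intro hmem
    obtain ⟨j, hj, hje⟩ := List.mem_iff_getElem.mp hmem
    have := h1 j (by omega)
    rw [List.getD_eq_getElem l 0 hj, hje] at this
    omega
  | succ m ih =>
    intro i port hf h1 h2
    by_cases h : i < l.length ∧ l.getD i 0 = port
    · rw [walkEq, dif_pos h]
      obtain ⟨hlen2, heq⟩ := h
      have hrec := ih (i + 1) (port + 1) (by omega)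
        (fun j hj => by
          rcases eq_or_lt_of_le (by omega : j ≤ i) with heq2 | hlt2
          · rw [heq2]; omega
          · have := h1 j hlt2; omega)
        (fun j hj hjl => by
          have := sorted_getD_strict l hs i j (by omega) hjl
          omega)
      obtain ⟨ha, hn, hi'⟩ := hrec
      refine ⟨by omega, hn, ?_⟩
      intro e he1 he2
      rcases eq_or_lt_of_le he1 with heq2 | hlt2
      · rw [← heq2, ← heq, List.getD_eq_getElem l 0 hlen2]
        exact List.getElem_mem hlen2
      · exact hi' e (by omega) he2
    · rw [walkEq, dif_neg h]
      refine ⟨le_refl port, ?_, fun e he1 he2 => absurd he2 (by omega)⟩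
      intro hmem
      obtain ⟨j, hj, hje⟩ := List.mem_iff_getElem.mp hmem
      rcases lt_trichotomy j i with hji | hji | hji
      · have := h1 j hji
        rw [List.getD_eq_getElem l 0 hj, hje] at this
        omega
      · refine h ⟨by omega, ?_⟩
        rw [← hji] at *
        rw [List.getD_eq_getElem l 0 hj, hje]
      · have hge := h2 i (le_refl i) (by omega)
        have := sorted_getD_strict l hs i j hji hj
        rw [List.getD_eq_getElem l 0 hj, hje] at this
        omega

theorem nextFree_spec (l : List Int) : ∀ (x : Int), l.Pairwise (· < ·) →
    x ≤ nextFreeB l x ∧ nextFreeB l x ∉ l ∧ (∀ e, x ≤ e → e < nextFreeB l x → e ∈ l) := by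
  intro x hs
  unfold nextFreeB
  rw [bisectL_eq l x hs l.length 0 l.length (by omega) (by omega) le_rfl
    (fun j hj => absurd hj (by omega)) (fun j hj hjl => absurd hjl (by omega))]
  obtain ⟨c1, c2⟩ := scanLT_char l x hs
  exact walk_spec l hs l.length (scanLT l x) x (by omega) c1 c2

-- after the release phase, B's busy list holds exactly the ports still transmitting
theorem busy1_spec (P tt : Int) (out : List Int) (dct : PySem.Dict Int Int) (busy : List Int)
    (hInv : PortInv P tt out dct busy) (busy1 : List Int)
    (hb1 : busy1 = if tt ≥ 1 ∧ (out.length : Int) ≥ tt then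
        (PySem.List.remove? busy (PySem.List.pyGetD out ((out.length : Int) - tt) 0)).getD busy
      else busy) :
    busy1.Pairwise (· < ·) ∧
    (∀ q, q ∈ busy1 ↔ ∃ v, dct.get? q = some v ∧ (out.length : Int) < v) ∧
    ((busy1.length : Int) = (busy.length : Int) - (if tt ≥ 1 ∧ (out.length : Int) ≥ tt then 1 else 0)) := by
  obtain ⟨hsort, hmem, hL1, hL2, hL4, hL5, hLEN⟩ := hInv
  have hk0 : (0 : Int) ≤ (out.length : Int) := Int.natCast_nonneg _
  have hnodup : busy.Nodup := List.Pairwise.imp (fun h => ne_of_lt h) hsort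
  by_cases hg : tt ≥ 1 ∧ (out.length : Int) ≥ tt
  · obtain ⟨htt1, hktt⟩ := hg
    have hc0nn : (0 : Int) ≤ (out.length : Int) - tt := by omega
    have hc0cast : (((out.length : Int) - tt).toNat : Int) = (out.length : Int) - tt :=
      Int.toNat_of_nonneg hc0nn
    have hc0lt : ((out.length : Int) - tt).toNat < out.length := by omega
    have hback : PySem.List.pyGetD out ((out.length : Int) - tt) 0 =
        out[((out.length : Int) - tt).toNat] :=
      PySem.List.pyGetD_eq_getElem out 0 hc0nn (by omega)
    obtain ⟨q0, hq0, hq0a, hq0b, hq0ge⟩ := hL2 _ hc0lt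
    have hbackq0 : out[((out.length : Int) - tt).toNat] = q0 := by
      rw [List.getElem?_eq_getElem hc0lt] at hq0
      exact Option.some.inj hq0
    have hq0ge' : (out.length : Int) ≤ dct.getD q0 0 := by
      have := hq0ge; omega
    obtain ⟨v, hv⟩ : ∃ v, dct.get? q0 = some v := by
      cases hvq : dct.get? q0 with
      | none => rw [PySem.Dict.getD_of_get?_eq_none dct 0 hvq] at hq0ge'; omega
      | some v => exact ⟨v, rfl⟩
    have hgdv : dct.getD q0 0 = v := PySem.Dict.getD_of_get?_eq_some dct 0 hv
    obtain ⟨c, hc, hveq, hqc⟩ := hL1 q0 v hv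
    have hvk : v = (out.length : Int) := by
      rcases lt_trichotomy c (((out.length : Int) - tt).toNat) with h | h | h
      · have := hL5 q0 v hv _ hc0lt hq0; omega
      · omega
      · have := hL4 htt1 _ c h hc (hq0.trans hqc.symm); omega
    have hbackmem : q0 ∈ busy := (hmem q0).mpr ⟨v, hv, by omega⟩
    have hrem : busy1 = busy.erase q0 := by
      rw [hb1, if_pos ⟨htt1, hktt⟩, hback, hbackq0,
        PySem.List.remove?_eq_some_erase busy q0 hbackmem]
      rfl
    have h1len : 1 ≤ busy.length := List.length_pos_of_mem hbackmem
    refine ⟨hrem ▸ List.Pairwise.sublist (List.erase_sublist) hsort, ?_, ?_⟩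
    · intro q
      rw [hrem, List.Nodup.mem_erase_iff hnodup, hmem q]
      constructor
      · rintro ⟨hne, w, hw, hwk⟩
        refine ⟨w, hw, ?_⟩
        by_cases hwk2 : w = (out.length : Int)
        · exfalso
          obtain ⟨c', hc', hweq, hqc'⟩ := hL1 q w hw
          have hcc : c' = ((out.length : Int) - tt).toNat := by omega
          rw [hcc, hq0] at hqc'
          exact hne (Option.some.inj hqc').symm
        · omega
      · rintro ⟨w, hw, hwk⟩
        refine ⟨?_, w, hw, by omega⟩
        intro hqq
        rw [hqq, hv] at hw
        have := Option.some.inj hw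
        omega
    · rw [hrem, if_pos ⟨htt1, hktt⟩, List.length_erase_of_mem hbackmem]
      push_cast [Nat.cast_sub h1len]
      ring
  · have hb1' : busy1 = busy := by rw [hb1, if_neg hg]
    subst hb1'
    refine ⟨hsort, ?_, by rw [if_neg hg]; simp⟩
    intro q
    rw [hmem q]
    constructor
    · rintro ⟨w, hw, hwk⟩
      refine ⟨w, hw, ?_⟩
      obtain ⟨c, hc, hweq, _⟩ := hL1 q w hw
      have hck : (c : Int) < (out.length : Int) := by exact_mod_cast hc
      by_cases htt : tt ≥ 1
      · have hk2 : ¬ ((out.length : Int) ≥ tt) := fun h => hg ⟨htt, h⟩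
        omega
      · omega
    · rintro ⟨w, hw, hwk⟩
      exact ⟨w, hw, by omega⟩

-- the per-step lemma: both steps append the same port, and the invariant is preserved
theorem step_main (P tt : Int) (out : List Int) (dct : PySem.Dict Int Int) (busy : List Int) (p : Int)
    (hP : 1 ≤ P) (hInv : PortInv P tt out dct busy) (hcap : tt ≤ P ∨ (out.length : Int) < P) :
    (stepA P tt (out, dct) ((out.length : Int), p)).1 = (stepB P tt (out, busy) ((out.length : Int), p)).1 ∧
    PortInv P tt (stepA P tt (out, dct) ((out.length : Int), p)).1
      (stepA P tt (out, dct) ((out.length : Int), p)).2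
      (stepB P tt (out, busy) ((out.length : Int), p)).2 := by
  have hk0 : (0 : Int) ≤ (out.length : Int) := Int.natCast_nonneg _
  set B1 := (if tt ≥ 1 ∧ (out.length : Int) ≥ tt then
      (PySem.List.remove? busy (PySem.List.pyGetD out ((out.length : Int) - tt) 0)).getD busy
    else busy) with hB1def
  obtain ⟨hB1sort, hB1mem, hB1len⟩ := busy1_spec P tt out dct busy hInv B1 hB1def
  obtain ⟨hsort, hmem, hL1, hL2, hL4, hL5, hLEN⟩ := hInv
  have hd0 : 0 ≤ PySem.Int.mod p P := by
    rw [PySem.Int.mod_eq_emod_of_pos (by omega)]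
    exact Int.emod_nonneg p (by omega)
  have hdP : PySem.Int.mod p P < P := by
    rw [PySem.Int.mod_eq_emod_of_pos (by omega)]
    exact Int.emod_lt_of_pos p (by omega)
  set d := PySem.Int.mod p P with hddef
  have httEmpty : tt ≤ 0 → busy = [] := by
    intro htt
    rw [List.eq_nil_iff_forall_not_mem]
    intro q hq
    obtain ⟨w, hw, hwk⟩ := (hmem q).mp hq
    obtain ⟨c, hc, hweq, _⟩ := hL1 q w hw
    have : (c : Int) < (out.length : Int) := by exact_mod_cast hc
    omega
  have hB1small : (B1.length : Int) < P := by
    by_cases htt : tt ≥ 1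
    · have hlb := hLEN htt
      rw [hB1len, hlb]
      split_ifs with hg <;> omega
    · have hempty := httEmpty (by omega)
      rw [hB1len, hempty, if_neg (by intro h; exact htt h.1)]
      simp
      omega
  have hbusy_iff : ∀ e, (e ∈ B1 ↔ dct.getD e 0 > (out.length : Int)) := by
    intro e
    rw [hB1mem e]
    constructor
    · rintro ⟨w, hw, hwk⟩
      rw [PySem.Dict.getD_of_get?_eq_some dct 0 hw]
      omega
    · intro h
      cases he : dct.get? e with
      | none => rw [PySem.Dict.getD_of_get?_eq_none dct 0 he] at h; omega
      | some w =>
        rw [PySem.Dict.getD_of_get?_eq_some dct 0 he] at h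
        exact ⟨w, rfl, by omega⟩
  obtain ⟨hnf1a, hnf1b, hnf1c⟩ := nextFree_spec B1 d hB1sort
  set T0 := nextFreeB B1 d with hT0def
  set T := (if T0 ≥ P then nextFreeB B1 0 else T0) with hTdef
  have hTprops : 0 ≤ T ∧ T < P ∧ T ∉ B1 ∧ probeA P dct (out.length : Int) P.natAbs d = T := by
    by_cases hwrap : T0 ≥ P
    · obtain ⟨hna, hnb, hnc⟩ := nextFree_spec B1 0 hB1sort
      have hTeq : T = nextFreeB B1 0 := by rw [hTdef, if_pos hwrap]
      have hYlt : nextFreeB B1 0 < P := by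
        by_contra hge
        push Not at hge
        have hsub : (PySem.List.pyRange 0 P 1) ⊆ B1 := by
          intro e he
          rw [PySem.List.mem_pyRange_one] at he
          exact hnc e he.1 (by omega)
        have hll := nodup_length_le _ _ (PySem.List.nodup_pyRange_one 0 P) hsub
        rw [PySem.List.length_pyRange_one] at hll
        omega
      have hYd : nextFreeB B1 0 < d := by
        by_contra hlt
        push Not at hlt
        exact hnb (hnf1c _ hlt (by omega))
      refine ⟨by omega, by omega, hTeq ▸ hnb, ?_⟩
      rw [hTeq]
      have hbusyhi : ∀ e, d ≤ e → e < P → dct.getD e 0 > (out.length : Int) :=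
        fun e he1 he2 => (hbusy_iff e).mp (hnf1c e he1 (by omega))
      rw [probe_wrap P dct (out.length : Int) hP P.natAbs d hd0 hdP hbusyhi (by omega)]
      refine probe_seg P dct (out.length : Int) _ (fun h => hnb ((hbusy_iff _).mpr (by omega)))
        hYlt _ 0 le_rfl hna (by omega) ?_
      intro e he1 he2
      exact (hbusy_iff e).mp (hnc e he1 he2)
    · have hTeq : T = T0 := by rw [hTdef, if_neg hwrap]
      push Not at hwrap
      refine ⟨by omega, by omega, hTeq ▸ hnf1b, ?_⟩
      rw [hTeq, hT0def]
      refine probe_seg P dct (out.length : Int) _ (fun h => hnf1b ((hbusy_iff _).mpr (by omega)))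
        (by omega) _ d hd0 hnf1a (by omega) ?_
      intro e he1 he2
      exact (hbusy_iff e).mp (hnf1c e he1 he2)
  obtain ⟨hT1, hT2, hTnotin, hprobe⟩ := hTprops
  have hT3 : dct.getD T 0 ≤ (out.length : Int) := by
    by_contra h
    exact hTnotin ((hbusy_iff T).mpr (by omega))
  set B2 := (if tt ≥ 1 then PySem.List.insert B1 ((bisectL B1 T 0 B1.length : Nat) : Int) T else B1) with hB2def
  have hbeq : ((bisectL B1 T 0 B1.length : Nat) : Int) = ((scanLT B1 T : Nat) : Int) := by
    rw [bisectL_eq B1 T hB1sort B1.length 0 B1.length (by omega) (by omega) le_rfl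
      (fun j hj => absurd hj (by omega)) (fun j hj hjl => absurd hjl (by omega))]
  have hstepA : stepA P tt (out, dct) ((out.length : Int), p) =
      (out ++ [probeA P dct (out.length : Int) P.natAbs d],
       dct.insert (probeA P dct (out.length : Int) P.natAbs d) (tt + (out.length : Int))) := rfl
  have hstepB : stepB P tt (out, busy) ((out.length : Int), p) = (out ++ [T], B2) := rfl
  rw [hstepA, hstepB, hprobe]
  refine ⟨rfl, ?_, ?_, ?_, ?_, ?_, ?_, ?_⟩
  · -- sorted
    by_cases htt : tt ≥ 1
    · rw [hB2def, if_pos htt, hbeq]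
      exact (insert_scan_spec B1 T hB1sort hTnotin).1
    · rw [hB2def, if_neg htt]
      exact hB1sort
  · -- membership
    intro q
    simp only [PySem.Dict.get?_insert, List.length_append, List.length_cons, List.length_nil]
    push_cast
    by_cases htt : tt ≥ 1
    · rw [hB2def, if_pos htt, hbeq, (insert_scan_spec B1 T hB1sort hTnotin).2.1 q]
      by_cases hqT : q = T
      · subst hqT
        constructor
        · intro _
          exact ⟨tt + (out.length : Int), by rw [if_pos rfl], by omega⟩
        · intro _
          exact Or.inl rfl
      · rw [hB1mem q]
        constructor
        · rintro (rfl | ⟨w, hw, hwk⟩)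
          · exact absurd rfl hqT
          · exact ⟨w, by rw [if_neg hqT]; exact hw, by omega⟩
        · rintro ⟨w, hw, hwk⟩
          rw [if_neg hqT] at hw
          exact Or.inr ⟨w, hw, by omega⟩
    · rw [hB2def, if_neg htt]
      have hB1e : B1 = busy := by rw [hB1def, if_neg (by intro h; exact htt h.1)]
      rw [hB1e, httEmpty (by omega)]
      constructor
      · intro h; cases h
      · rintro ⟨w, hw, hwk⟩
        by_cases hqT : q = T
        · rw [if_pos hqT] at hw
          have := Option.some.inj hw
          omega
        · rw [if_neg hqT] at hw
          obtain ⟨c, hc, hweq, _⟩ := hL1 q w hw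
          have : (c : Int) < (out.length : Int) := by exact_mod_cast hc
          omega
  · -- L1
    intro q v hv
    rw [PySem.Dict.get?_insert] at hv
    by_cases hqT : q = T
    · rw [if_pos hqT] at hv
      refine ⟨out.length, by simp, by rw [← Option.some.inj hv], ?_⟩
      rw [List.getElem?_concat_length, hqT]
    · rw [if_neg hqT] at hv
      obtain ⟨c, hc, hveq, hqc⟩ := hL1 q v hv
      exact ⟨c, by simp; omega, hveq, by rw [List.getElem?_append_left hc]; exact hqc⟩
  · -- L2
    intro c hc
    by_cases hck : c < out.length
    · obtain ⟨q, hqc, h1, h2, hge⟩ := hL2 c hck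
      refine ⟨q, by rw [List.getElem?_append_left hck]; exact hqc, h1, h2, ?_⟩
      rw [PySem.Dict.getD_insert]
      split_ifs with hqT
      · have : (c : Int) < (out.length : Int) := by exact_mod_cast hck
        omega
      · exact hge
    · have hck' : c = out.length := by simp at hc; omega
      subst hck'
      refine ⟨T, List.getElem?_concat_length, hT1, hT2, ?_⟩
      rw [PySem.Dict.getD_insert, if_pos rfl]
  · -- L4
    intro htt c c' hcc' hc' heq
    by_cases h2 : c' < out.length
    · rw [List.getElem?_append_left (by omega : c < out.length), List.getElem?_append_left h2] at heq
      exact hL4 htt c c' hcc' h2 heq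
    · have hc'eq : c' = out.length := by simp at hc'; omega
      subst hc'eq
      rw [List.getElem?_append_left hcc', List.getElem?_concat_length] at heq
      obtain ⟨q, hqc, _, _, hge⟩ := hL2 c hcc'
      have hqT : q = T := by rw [heq] at hqc; exact (Option.some.inj hqc).symm
      subst hqT
      omega
  · -- L5
    intro q v hv c hc hqc
    rw [PySem.Dict.get?_insert] at hv
    by_cases hqT : q = T
    · rw [if_pos hqT] at hv
      have hvv := Option.some.inj hv
      simp only [List.length_append, List.length_cons, List.length_nil] at hc
      omega
    · rw [if_neg hqT] at hv
      by_cases hck : c < out.length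
      · rw [List.getElem?_append_left hck] at hqc
        exact hL5 q v hv c hck hqc
      · have hck' : c = out.length := by simp at hc; omega
        subst hck'
        rw [List.getElem?_concat_length] at hqc
        exact absurd (Option.some.inj hqc).symm hqT
  · -- LEN
    intro htt
    rw [hB2def, if_pos htt, hbeq]
    have h1 := (insert_scan_spec B1 T hB1sort hTnotin).2.2
    have h2 := hLEN htt
    simp only [List.length_append, List.length_cons, List.length_nil]
    split_ifs at hB1len with hg <;> push_cast [h1] <;> push_cast at hB1len h2 ⊢ <;> omega

theorem fold_eq (P tt : Int) (hP : 1 ≤ P) :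
    ∀ (rest : List Int) (out : List Int) (dct : PySem.Dict Int Int) (busy : List Int),
    PortInv P tt out dct busy → (tt ≤ P ∨ ((out.length : Int) + (rest.length : Int) ≤ P)) →
    ((PySem.List.enumerate rest (out.length : Int)).foldl (stepA P tt) (out, dct)).1 =
    ((PySem.List.enumerate rest (out.length : Int)).foldl (stepB P tt) (out, busy)).1 := by
  intro rest
  induction rest with
  | nil => intro out dct busy _ _; simp [PySem.List.enumerate_nil]
  | cons p rest' ih =>
    intro out dct busy hInv hcap
    rw [PySem.List.enumerate_cons]
    simp only [List.foldl_cons]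
    obtain ⟨houts, hInv'⟩ := step_main P tt out dct busy p hP hInv
      (by rcases hcap with h | h
          · exact Or.inl h
          · right; simp only [List.length_cons] at h; push_cast at h; omega)
    have hA1 : (stepA P tt (out, dct) ((out.length : Int), p)).1 =
        out ++ [probeA P dct (out.length : Int) P.natAbs (PySem.Int.mod p P)] := rfl
    have hlen1 : (((stepA P tt (out, dct) ((out.length : Int), p)).1.length : Nat) : Int) = (out.length : Int) + 1 := by
      rw [hA1]; simp
    have hcap' : tt ≤ P ∨ (((stepA P tt (out, dct) ((out.length : Int), p)).1.length : Int) + (rest'.length : Int) ≤ P) := by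
      rcases hcap with h | h
      · exact Or.inl h
      · right; rw [hlen1]; simp only [List.length_cons] at h; push_cast at h ⊢; omega
    have hmain := ih (stepA P tt (out, dct) ((out.length : Int), p)).1
        (stepA P tt (out, dct) ((out.length : Int), p)).2
        (stepB P tt (out, busy) ((out.length : Int), p)).2 hInv' hcap'
    rw [hlen1] at hmain
    have e1 : ((stepA P tt (out, dct) ((out.length : Int), p)).1, (stepA P tt (out, dct) ((out.length : Int), p)).2)
        = stepA P tt (out, dct) ((out.length : Int), p) := rfl
    have e2 : ((stepA P tt (out, dct) ((out.length : Int), p)).1, (stepB P tt (out, busy) ((out.length : Int), p)).2)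
        = stepB P tt (out, busy) ((out.length : Int), p) := by
      rw [houts]
    rw [e1, e2] at hmain
    exact hmain

-- ===== VERDICT (by name: the statement is the Claim_ definition above) =====
theorem sentTimes_spec : Claim_equal_sentTimes := by
  intro P tt pk _ hpre
  show sentTimes P tt pk = sentTimes_alt P tt pk
  rcases hpre with rfl | ⟨hP, hcap0⟩
  · rfl
  · unfold sentTimes sentTimes_alt
    have hinv : PortInv P tt [] PySem.Dict.empty [] := by
      refine ⟨List.Pairwise.nil, ?_, ?_, ?_, ?_, ?_, ?_⟩
      · intro q
        constructor
        · intro h; cases h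
        · rintro ⟨v, hv, _⟩; rw [PySem.Dict.get?_empty] at hv; cases hv
      · intro q v hv; rw [PySem.Dict.get?_empty] at hv; cases hv
      · intro c hc; simp at hc
      · intro _ c c' _ hc'; simp at hc'
      · intro q v hv; rw [PySem.Dict.get?_empty] at hv; cases hv
      · intro htt; simp; omega
    have hcap : tt ≤ P ∨ ((([] : List Int).length : Int) + (pk.length : Int) ≤ P) := by
      rcases hcap0 with h | h
      · exact Or.inl h
      · right; simp; omega
    have h := fold_eq P tt hP pk [] PySem.Dict.empty [] hinv hcap
    simpa using h
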